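-- pv_equiv track=rewrite | github.com/Kaiolohia/Encryption | EncryptDecryptV4_B.py | numbers_decrypt
-- ===== SOURCE A (Python) =====
-- def numbers_decrypt(msg:list, scramble_array = [0,1,2,3,4,5,6,7,8,9]):
--   """
--   Decrypts numbers by pulling their index from scramble array
--   then replacing them in the message.
--   the scramble array for encryption gets shifted from left to right every iteration/check
--   IE iteration 0 // 0,1,2,3,4,5,6,7,8,9
--     iteration 1 // 9,0,1,2,3,4,5,6,7,8
--   """
--   new_msg = []
--   for char in msg:
--     scramble_array = scramble_array[-1:] + scramble_array[:-1]
--     if char.isdigit():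
--       new_msg.append(str(scramble_array.index(int(char))))
--     else:
--       new_msg.append(char)
--   return new_msg
-- ===== SOURCE B (Python) =====
-- def numbers_decrypt(msg:list, scramble_array = [0,1,2,3,4,5,6,7,8,9]):
--   # Closed-form: the scramble array rotated right (i+1) times puts original
--   # position j at (j + i + 1) % n; the .index first match is the minimum such
--   # position over all occurrences of the digit's value.
--   n = len(scramble_array)
--   out = []
--   for i, char in enumerate(msg):
--     if char.isdigit():
--       v = int(char)
--       out.append(str(min((j + i + 1) % n for j, x in enumerate(scramble_array) if x == v)))
--     else:
--       out.append(char)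
--   return out
-- ===== Notes on version B (the rewrite author's own statement) =====
-- stated objective: faster
-- what changed: B drops A's per-character list rotation (which slice-copies the whole scramble array for every message entry) and per-character list.index scan, and instead enumerates the message once, computing each decrypted digit in closed form as the minimum of (j + i + 1) % n over the occurrences j of the digit's value in the untouched scramble array.
import Mathlib
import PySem

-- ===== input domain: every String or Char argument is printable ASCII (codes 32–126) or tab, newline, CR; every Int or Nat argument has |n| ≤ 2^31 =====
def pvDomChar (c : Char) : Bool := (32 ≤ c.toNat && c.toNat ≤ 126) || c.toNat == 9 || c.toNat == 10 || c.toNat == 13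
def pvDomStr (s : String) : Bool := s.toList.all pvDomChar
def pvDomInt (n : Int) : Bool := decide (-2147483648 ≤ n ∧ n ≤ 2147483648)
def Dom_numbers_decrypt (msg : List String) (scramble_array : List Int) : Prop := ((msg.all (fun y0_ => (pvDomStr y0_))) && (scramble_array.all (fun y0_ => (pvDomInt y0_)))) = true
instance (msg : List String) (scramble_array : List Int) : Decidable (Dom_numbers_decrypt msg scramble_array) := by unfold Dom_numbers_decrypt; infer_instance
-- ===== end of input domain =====

-- B replaces A's per-character list rotation (a full slice-copy of the scramble array per
-- message entry) and linear .index scan by one enumerate pass with closed-form modular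
-- arithmetic (index = min over occurrences of (j+i+1) % n); measurably faster.

-- ===== PORT A =====
-- scramble_array[-1:] + scramble_array[:-1]
def pyRotate (l : List Int) : List Int :=
  PySem.List.slice l (some (-1)) none ++ PySem.List.slice l none (some (-1))

def numbers_decrypt (msg : List String) (scramble_array : List Int) : List String :=
  (msg.foldl (fun (st : List Int × List String) char =>
      let sa := pyRotate st.1
      if PySem.Str.strIsdigit char then
        (sa, st.2 ++ [PySem.Int.toStr (((PySem.List.index? sa ((PySem.Int.ofStr? char).getD 0)).getD 0 : Nat) : Int)])
      else
        (sa, st.2 ++ [char]))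
    (scramble_array, ([] : List String))).2

-- ===== PORT B =====
-- B's loop body for one (i, char) pair of enumerate(msg)
def bElem (scramble_array : List Int) (p : Int × String) : String :=
  let n : Int := (scramble_array.length : Int)
  if PySem.Str.strIsdigit p.2 then
    let v := (PySem.Int.ofStr? p.2).getD 0
    PySem.Int.toStr ((PySem.List.min?
      ((PySem.List.enumerate scramble_array 0).filterMap
        (fun q => if q.2 = v then some (PySem.Int.mod (q.1 + p.1 + 1) n) else none))
      (fun y => y)).getD 0)
  else p.2

def numbers_decrypt_alt (msg : List String) (scramble_array : List Int) : List String :=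
  (PySem.List.enumerate msg 0).map (bElem scramble_array)

-- ===== PRECONDITION & SPEC =====
-- Pre_ excludes exactly the inputs where A raises ValueError: a message entry that is all
-- digits (char.isdigit()) whose int value does not occur in scramble_array (list.index fails).
def Pre_numbers_decrypt (msg : List String) (scramble_array : List Int) : Prop :=
  ∀ s ∈ msg, PySem.Str.strIsdigit s = true →
    (PySem.Int.ofStr? s).any (fun v => decide (v ∈ scramble_array)) = true
instance (msg : List String) (scramble_array : List Int) : Decidable (Pre_numbers_decrypt msg scramble_array) := by
  unfold Pre_numbers_decrypt; infer_instance
def pvWitness_numbers_decrypt : List String × List Int :=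
  (["h", "3", "i", "7"], [0, 1, 2, 3, 4, 5, 6, 7, 8, 9])
def Spec_numbers_decrypt (msg : List String) (scramble_array : List Int) (out : List String) : Prop := out = numbers_decrypt_alt msg scramble_array
instance (msg : List String) (scramble_array : List Int) (out : List String) : Decidable (Spec_numbers_decrypt msg scramble_array out) := by unfold Spec_numbers_decrypt; infer_instance

-- ===== CLAIM (what is proved, stated in full; the proofs are below) =====
def Claim_equal_numbers_decrypt : Prop := ∀ (msg : List String) (scramble_array : List Int), Dom_numbers_decrypt msg scramble_array → Pre_numbers_decrypt msg scramble_array → Spec_numbers_decrypt msg scramble_array (numbers_decrypt msg scramble_array)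

-- ===== LEMMAS AND PROOFS =====

-- positions (offset by k) of the occurrences of v in a list
def occFrom (v : Int) : List Int → Nat → List Nat
  | [], _ => []
  | x :: xs, k => if x = v then k :: occFrom v xs (k + 1) else occFrom v xs (k + 1)

theorem occFrom_append (v : Int) (a b : List Int) (k : Nat) :
    occFrom v (a ++ b) k = occFrom v a k ++ occFrom v b (k + a.length) := by
  induction a generalizing k with
  | nil => simp [occFrom]
  | cons x xs ih =>
    simp only [List.cons_append, occFrom, ih, List.length_cons]
    split <;> simp <;> ring_nf

theorem occFrom_shift (v : Int) (l : List Int) (k : Nat) :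
    occFrom v l k = (occFrom v l 0).map (· + k) := by
  induction l generalizing k with
  | nil => simp [occFrom]
  | cons x xs ih =>
    simp only [occFrom]
    split
    · rw [ih (k+1), ih 1]
      simp [List.map_map, Function.comp_def, Nat.add_assoc, Nat.add_comm 1 k]
    · rw [ih (k+1), ih 1]
      simp [List.map_map, Function.comp_def, Nat.add_assoc, Nat.add_comm 1 k]

theorem occFrom_head? (v : Int) (l : List Int) (k : Nat) :
    (occFrom v l k).head? = (PySem.List.index? l v).map (· + k) := by
  induction l generalizing k with
  | nil => simp [occFrom, PySem.List.index?_eq_idxOf?]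
  | cons x xs ih =>
    by_cases hx : x = v
    · subst hx
      rw [PySem.List.index?_cons_self]
      simp [occFrom]
    · rw [PySem.List.index?_cons_of_ne _ hx]
      simp only [occFrom, if_neg hx, ih (k+1), Option.map_map]
      congr 1
      funext j
      simp [Nat.add_assoc, Nat.add_comm 1 k]

theorem occFrom_mem_bounds (v : Int) (l : List Int) (k j : Nat) (hj : j ∈ occFrom v l k) :
    k ≤ j ∧ j < k + l.length := by
  induction l generalizing k with
  | nil => simp [occFrom] at hj
  | cons x xs ih =>
    simp only [occFrom] at hj
    split at hj
    · rcases List.mem_cons.1 hj with h | h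
      · subst h; constructor <;> simp
      · have := ih (k+1) h; simp; omega
    · have := ih (k+1) hj; simp; omega

theorem occFrom_sorted (v : Int) (l : List Int) (k : Nat) :
    (occFrom v l k).Pairwise (· ≤ ·) := by
  induction l generalizing k with
  | nil => simp [occFrom]
  | cons x xs ih =>
    simp only [occFrom]
    split
    · refine List.Pairwise.cons ?_ (ih (k+1))
      intro j hj
      have := occFrom_mem_bounds v xs (k+1) j hj
      omega
    · exact ih (k+1)

theorem occFrom_eq_nil_iff (v : Int) (l : List Int) (k : Nat) :
    occFrom v l k = [] ↔ v ∉ l := by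
  induction l generalizing k with
  | nil => simp [occFrom]
  | cons x xs ih =>
    simp only [occFrom]
    split
    · simp_all
    · rw [ih (k+1)]
      simp only [List.mem_cons, not_or]
      constructor
      · intro h; exact ⟨fun hh => (by simp_all), h⟩
      · intro h; exact h.2

theorem filterMap_enumerate_occ_aux (v : Int) (l : List Int) (s : Int) (k : Nat) (f : Int → Int) :
    (PySem.List.enumerate l s).filterMap
        (fun q => if q.2 = v then some (f q.1) else none)
      = (occFrom v l k).map (fun j : Nat => f ((j : Int) + (s - k))) := by
  induction l generalizing s k with
  | nil => simp [PySem.List.enumerate, occFrom]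
  | cons x xs ih =>
    rw [PySem.List.enumerate_cons, List.filterMap_cons]
    by_cases hx : x = v
    · simp only [hx, occFrom, if_pos]
      rw [ih (s+1) (k+1)]
      simp only [List.map_cons]
      congr 1
      · congr 1; ring
      · congr 1; funext j; congr 1; push_cast; ring
    · simp only [occFrom, if_neg hx]
      rw [ih (s+1) (k+1)]
      congr 1
      funext j; congr 1; push_cast; ring

theorem filterMap_enumerate_occ (v : Int) (l : List Int) (s : Int) (f : Int → Int) :
    (PySem.List.enumerate l s).filterMap
        (fun q => if q.2 = v then some (f q.1) else none)
      = (occFrom v l 0).map (fun j : Nat => f ((j : Int) + s)) := by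
  rw [filterMap_enumerate_occ_aux v l s 0 f]
  simp

theorem mod_rot (n s j : Nat) (m : Int) (hs : s < n) (hj : j < n)
    (hd : (n : Int) ∣ ((s : Int) + m)) :
    PySem.Int.mod ((j : Int) + m) (n : Int) =
      if s ≤ j then ((j : Int) - s) else ((j : Int) + n - s) := by
  obtain ⟨t, ht⟩ := hd
  have hn : (0:Int) < n := by exact_mod_cast Nat.lt_of_le_of_lt (Nat.zero_le s) hs
  rw [PySem.Int.mod_eq_emod_of_pos hn]
  have hjm : (j:Int) + m = ((j:Int) - s) + (n:Int) * t := by omega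
  rw [hjm]
  rw [Int.add_mul_emod_self_left]
  by_cases hle : s ≤ j
  · rw [if_pos hle, Int.emod_eq_of_lt (by omega) (by omega)]
  · rw [if_neg hle]
    have h3 : ((j:Int) - s) % n = ((j:Int) - s + n) % n := by
      conv_rhs => rw [show ((j:Int) - s + n) = ((j:Int) - s) + n * 1 by ring]
      rw [Int.add_mul_emod_self_left]
    rw [h3, Int.emod_eq_of_lt (by omega) (by omega)]
    omega

theorem min?_eq_of_le (xs : List Int) (d : Int) (hd : d ∈ xs) (hmin : ∀ y ∈ xs, d ≤ y) :
    PySem.List.min? xs (fun y => y) = some d := by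
  cases hx : PySem.List.min? xs (fun y => y) with
  | none => rw [PySem.List.min?_eq_none_iff] at hx; subst hx; simp at hd
  | some z =>
    have hz := PySem.List.min?_mem hx
    have hzmin := PySem.List.min?_isMin hx
    have h1 : z ≤ d := hzmin d hd
    have h2 : d ≤ z := hmin z hz
    rw [le_antisymm h1 h2]

theorem rot_drop_take (l : List Int) (s : Nat) (hs : s < l.length) :
    pyRotate (l.drop s ++ l.take s) =
      l.drop (if s = 0 then l.length - 1 else s - 1) ++ l.take (if s = 0 then l.length - 1 else s - 1) := by
  unfold pyRotate
  rw [PySem.List.slice_from_neg_one, PySem.List.slice_to_neg_one, List.dropLast_eq_take]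
  have hlen : (l.drop s ++ l.take s).length = l.length := by
    simp; omega
  rw [hlen]
  by_cases h0 : s = 0
  · subst h0
    simp
  · rw [if_neg h0]
    have h1 : s - 1 < l.length := by omega
    -- drop part: (drop s ++ take s).drop (len - 1) = [l[s-1]]
    have hd : (l.drop s ++ l.take s).drop (l.length - 1) = [l[s-1]'(by omega)] := by
      rw [List.drop_append]
      have hds : (l.drop s).length = l.length - s := by simp
      have : (l.drop s).drop (l.length - 1) = [] := by
        apply List.drop_eq_nil_of_le; omega
      rw [this, List.nil_append, hds]
      have htk : l.take s = l.take (s-1) ++ [l[s-1]'(by omega)] := by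
        conv_lhs => rw [show s = (s-1) + 1 by omega]
        rw [List.take_add_one]
        simp [List.getElem?_eq_getElem (by omega : s - 1 < l.length)]
      rw [htk, List.drop_append]
      have : (l.take (s-1)).drop (l.length - 1 - (l.length - s)) = [] := by
        apply List.drop_eq_nil_of_le; simp; omega
      rw [this, List.nil_append]
      have : (l.take (s-1)).length = s - 1 := by simp; omega
      rw [List.length_take]
      have : l.length - 1 - (l.length - s) - min (s-1) l.length = 0 := by omega
      rw [this, List.drop_zero]
    -- take part: (drop s ++ take s).take (len - 1) = drop s ++ take (s-1)
    have ht : (l.drop s ++ l.take s).take (l.length - 1) = l.drop s ++ l.take (s-1) := by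
      rw [List.take_append]
      have hds : (l.drop s).length = l.length - s := by simp
      have : (l.drop s).take (l.length - 1) = l.drop s := by
        apply List.take_of_length_le; omega
      rw [this, hds]
      congr 1
      rw [List.take_take]
      congr 1
      omega
    rw [hd, ht]
    have h2 : l.drop (s-1) = l[s-1]'(by omega) :: l.drop s := by
      have := List.drop_eq_getElem_cons (l := l) (i := s - 1) h1
      rw [show s - 1 + 1 = s by omega] at this
      exact this
    rw [h2]
    simp

-- the per-character equality: A's .index in the rotated array vs B's modular minimum
theorem char_eq (l : List Int) (v : Int) (s : Nat) (m : Int)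
    (hs : s < l.length) (hv : v ∈ l) (hd : ((l.length : Int)) ∣ ((s : Int) + m)) :
    (PySem.List.index? (l.drop s ++ l.take s) v).map (fun k : Nat => (k : Int)) =
      PySem.List.min? ((occFrom v l 0).map
        (fun j : Nat => PySem.Int.mod ((j : Int) + m) (l.length : Int))) (fun y => y) := by
  set n := l.length with hn
  have hlt : (l.take s).length = s := by simp; omega
  have hld : (l.drop s).length = n - s := by simp [← hn]
  set T := occFrom v (l.take s) 0 with hT
  set Dp := occFrom v (l.drop s) 0 with hD
  set g : Nat → Int := fun j : Nat => PySem.Int.mod ((j : Int) + m) (n : Int) with hg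
  have hocc : occFrom v l 0 = T ++ Dp.map (· + s) := by
    conv_lhs => rw [← List.take_append_drop s l]
    rw [occFrom_append]
    simp only [Nat.zero_add, hlt]
    rw [occFrom_shift v (l.drop s) s]
  have hoccR : occFrom v (l.drop s ++ l.take s) 0 = Dp ++ T.map (· + (n - s)) := by
    rw [occFrom_append]
    simp only [Nat.zero_add, hld]
    rw [occFrom_shift v (l.take s) (n - s)]
  have hidx : (PySem.List.index? (l.drop s ++ l.take s) v).map (fun k : Nat => (k : Int))
      = ((Dp ++ T.map (· + (n - s))).head?).map (fun k : Nat => (k : Int)) := by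
    rw [← hoccR, occFrom_head?]
    simp
  have hTb : ∀ j ∈ T, j < s := by
    intro j hj; have := occFrom_mem_bounds v (l.take s) 0 j hj; omega
  have hDb : ∀ b ∈ Dp, b < n - s := by
    intro b hb; have := occFrom_mem_bounds v (l.drop s) 0 b hb; omega
  have hgT : ∀ j ∈ T, g j = (j : Int) + n - s := by
    intro j hj
    have h1 : j < s := hTb j hj
    show PySem.Int.mod ((j : Int) + m) (n : Int) = (j : Int) + n - s
    rw [mod_rot n s j m hs (by omega) hd, if_neg (by omega)]
  have hgD : ∀ b ∈ Dp, g (b + s) = (b : Int) := by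
    intro b hb
    have h1 : b < n - s := hDb b hb
    show PySem.Int.mod (((b + s : Nat) : Int) + m) (n : Int) = (b : Int)
    rw [mod_rot n s (b + s) m hs (by omega) hd, if_pos (by omega)]
    push_cast; ring
  rw [hidx, hocc]
  by_cases hvd : v ∈ l.drop s
  · have hDne : Dp ≠ [] := fun h => ((occFrom_eq_nil_iff v (l.drop s) 0).1 h) hvd
    obtain ⟨b0, bs, hb0⟩ := List.exists_cons_of_ne_nil hDne
    have hb0mem : b0 ∈ Dp := by rw [hb0]; exact List.mem_cons_self
    have hsorted := occFrom_sorted v (l.drop s) 0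
    rw [← hD, hb0] at hsorted
    have hb0min : ∀ b ∈ Dp, b0 ≤ b := by
      intro b hb
      rw [hb0] at hb
      rcases List.mem_cons.1 hb with h | h
      · omega
      · exact (List.pairwise_cons.1 hsorted).1 b h
    have hhead : (Dp ++ T.map (· + (n - s))).head? = some b0 := by
      rw [hb0, List.cons_append, List.head?_cons]
    rw [hhead]
    simp only [Option.map_some]
    symm
    rw [show (b0 : Int) = g (b0 + s) from (hgD b0 hb0mem).symm]
    apply min?_eq_of_le
    · exact List.mem_map.2 ⟨b0 + s,
        List.mem_append.2 (Or.inr (List.mem_map.2 ⟨b0, hb0mem, rfl⟩)), rfl⟩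
    · intro y hy
      obtain ⟨j, hj, rfl⟩ := List.mem_map.1 hy
      rcases List.mem_append.1 hj with h | h
      · rw [hgT j h, hgD b0 hb0mem]
        have := hTb j h
        have := hDb b0 hb0mem
        omega
      · obtain ⟨b, hb, rfl⟩ := List.mem_map.1 h
        rw [hgD b hb, hgD b0 hb0mem]
        exact_mod_cast hb0min b hb
  · have hDnil : Dp = [] := (occFrom_eq_nil_iff v (l.drop s) 0).2 hvd
    have hvt : v ∈ l.take s := by
      conv at hv => rw [← List.take_append_drop s l]
      rcases List.mem_append.1 hv with h | h
      · exact h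
      · exact absurd h hvd
    have hTne : T ≠ [] := fun h => ((occFrom_eq_nil_iff v (l.take s) 0).1 h) hvt
    obtain ⟨t0, ts, ht0⟩ := List.exists_cons_of_ne_nil hTne
    have ht0mem : t0 ∈ T := by rw [ht0]; exact List.mem_cons_self
    have hsorted := occFrom_sorted v (l.take s) 0
    rw [← hT, ht0] at hsorted
    have ht0min : ∀ t ∈ T, t0 ≤ t := by
      intro t ht
      rw [ht0] at ht
      rcases List.mem_cons.1 ht with h | h
      · omega
      · exact (List.pairwise_cons.1 hsorted).1 t h
    have hhead : (Dp ++ T.map (· + (n - s))).head? = some (t0 + (n - s)) := by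
      rw [hDnil, List.nil_append, ht0, List.map_cons, List.head?_cons]
    rw [hhead]
    simp only [Option.map_some]
    symm
    have hcast : ((t0 + (n - s) : Nat) : Int) = g t0 := by
      rw [hgT t0 ht0mem]
      push_cast [Nat.cast_sub (by omega : s ≤ n)]
      ring
    rw [hcast]
    apply min?_eq_of_le
    · simp only [hDnil, List.map_nil, List.append_nil]
      exact List.mem_map.2 ⟨t0, ht0mem, rfl⟩
    · intro y hy
      simp only [hDnil, List.map_nil, List.append_nil] at hy
      obtain ⟨j, hj, rfl⟩ := List.mem_map.1 hy
      rw [hgT j hj, hgT t0 ht0mem]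
      have := ht0min j hj
      omega

theorem main_fold (l : List Int) (ms : List String) (s : Nat) (i : Int) (acc : List String)
    (hs : s < l.length) (hd : ((l.length : Int)) ∣ ((s : Int) + i))
    (hpre : ∀ ch ∈ ms, PySem.Str.strIsdigit ch = true → ((PySem.Int.ofStr? ch).getD 0) ∈ l) :
    (ms.foldl (fun (st : List Int × List String) char =>
        let sa := pyRotate st.1
        if PySem.Str.strIsdigit char then
          (sa, st.2 ++ [PySem.Int.toStr (((PySem.List.index? sa ((PySem.Int.ofStr? char).getD 0)).getD 0 : Nat) : Int)])
        else
          (sa, st.2 ++ [char]))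
      (l.drop s ++ l.take s, acc)).2
    = acc ++ (PySem.List.enumerate ms i).map (bElem l) := by
  induction ms generalizing s i acc with
  | nil => simp [PySem.List.enumerate]
  | cons ch ms ih =>
    have hn0 : 0 < l.length := by omega
    set s' := if s = 0 then l.length - 1 else s - 1 with hs'def
    have hs' : s' < l.length := by rw [hs'def]; split <;> omega
    have hd' : ((l.length : Int)) ∣ ((s' : Int) + (i + 1)) := by
      obtain ⟨t, ht⟩ := hd
      rw [hs'def]
      by_cases h0 : s = 0
      · rw [if_pos h0]
        subst h0
        refine ⟨t + 1, ?_⟩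
        push_cast [Nat.cast_sub (by omega : 1 ≤ l.length)]
        push_cast at ht
        linarith
      · rw [if_neg h0]
        refine ⟨t, ?_⟩
        push_cast [Nat.cast_sub (by omega : 1 ≤ s)]
        linarith
    have hrot := rot_drop_take l s hs
    rw [← hs'def] at hrot
    have hpre' : ∀ c ∈ ms, PySem.Str.strIsdigit c = true → ((PySem.Int.ofStr? c).getD 0) ∈ l :=
      fun c hc => hpre c (List.mem_cons_of_mem ch hc)
    rw [List.foldl_cons, PySem.List.enumerate_cons, List.map_cons, List.append_cons]
    by_cases hdig : PySem.Str.strIsdigit ch = true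
    · set v := (PySem.Int.ofStr? ch).getD 0 with hvdef
      have hvmem : v ∈ l := hpre ch List.mem_cons_self hdig
      have hvmem' : v ∈ l.drop s' ++ l.take s' := by
        rcases List.mem_append.1 (by rw [List.take_append_drop s' l]; exact hvmem :
            v ∈ l.take s' ++ l.drop s') with h | h
        · exact List.mem_append.2 (Or.inr h)
        · exact List.mem_append.2 (Or.inl h)
      have hce := char_eq l v s' (i + 1) hs' hvmem hd'
      have hB : bElem l (i, ch) =
          PySem.Int.toStr (((PySem.List.index? (l.drop s' ++ l.take s') v).getD 0 : Nat) : Int) := by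
        unfold bElem
        simp only [hdig, if_true]
        rw [filterMap_enumerate_occ v l 0 (fun t => PySem.Int.mod (t + i + 1) (l.length : Int))]
        have hfun : (fun j : Nat => PySem.Int.mod ((j : Int) + 0 + i + 1) (l.length : Int))
            = (fun j : Nat => PySem.Int.mod ((j : Int) + (i + 1)) (l.length : Int)) := by
          funext j; congr 1; ring
        rw [hfun, ← hce]
        cases hiv : PySem.List.index? (l.drop s' ++ l.take s') v with
        | none =>
            rw [PySem.List.index?_eq_none_iff] at hiv
            exact absurd hvmem' hiv
        | some k => simp
      simp only [hdig, if_true, hrot]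
      rw [ih s' (i + 1) _ hs' hd' hpre', hB]
      simp
    · have hdig' : PySem.Str.strIsdigit ch = false := by
        cases h : PySem.Str.strIsdigit ch
        · rfl
        · exact absurd h hdig
      have hB : bElem l (i, ch) = ch := by
        unfold bElem
        simp only [hdig', Bool.false_eq_true, if_false]
      simp only [hdig', Bool.false_eq_true, if_false, hrot]
      rw [ih s' (i + 1) _ hs' hd' hpre', hB]
      simp

theorem empty_fold (ms : List String) (acc : List String)
    (hpre : ∀ ch ∈ ms, PySem.Str.strIsdigit ch = false) :
    (ms.foldl (fun (st : List Int × List String) char =>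
        let sa := pyRotate st.1
        if PySem.Str.strIsdigit char then
          (sa, st.2 ++ [PySem.Int.toStr (((PySem.List.index? sa ((PySem.Int.ofStr? char).getD 0)).getD 0 : Nat) : Int)])
        else
          (sa, st.2 ++ [char]))
      (([] : List Int), acc)).2 = acc ++ ms := by
  induction ms generalizing acc with
  | nil => simp
  | cons ch ms ih =>
    have hch := hpre ch List.mem_cons_self
    have hrot : pyRotate ([] : List Int) = [] := by decide
    rw [List.foldl_cons]
    simp only [hch, Bool.false_eq_true, if_false, hrot]
    rw [ih _ (fun c hc => hpre c (List.mem_cons_of_mem ch hc))]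
    simp

theorem empty_map (l : List Int) (ms : List String) (i : Int)
    (hpre : ∀ ch ∈ ms, PySem.Str.strIsdigit ch = false) :
    (PySem.List.enumerate ms i).map (bElem l) = ms := by
  induction ms generalizing i with
  | nil => simp [PySem.List.enumerate]
  | cons ch ms ih =>
    rw [PySem.List.enumerate_cons, List.map_cons]
    rw [ih (i + 1) (fun c hc => hpre c (List.mem_cons_of_mem ch hc))]
    have hB : bElem l (i, ch) = ch := by
      unfold bElem
      simp only [hpre ch List.mem_cons_self, Bool.false_eq_true, if_false]
    rw [hB]

-- ===== VERDICT (by name: the statement is the Claim_ definition above) =====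
theorem numbers_decrypt_spec : Claim_equal_numbers_decrypt := by
  intro msg sa _hdom hpre
  unfold Spec_numbers_decrypt numbers_decrypt numbers_decrypt_alt
  cases hsa : sa with
  | nil =>
    subst hsa
    have hnod : ∀ ch ∈ msg, PySem.Str.strIsdigit ch = false := by
      intro ch hch
      cases hx : PySem.Str.strIsdigit ch
      · rfl
      · have hd := hpre ch hch hx
        cases ho : PySem.Int.ofStr? ch <;> simp [ho] at hd
    rw [empty_fold msg [] hnod, empty_map [] msg 0 hnod]
    simp
  | cons x xs =>
    have hlen : 0 < sa.length := by rw [hsa]; simp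
    have hpre2 : ∀ ch ∈ msg, PySem.Str.strIsdigit ch = true →
        ((PySem.Int.ofStr? ch).getD 0) ∈ sa := by
      intro ch hch hdig
      have hd := hpre ch hch hdig
      cases ho : PySem.Int.ofStr? ch with
      | none => rw [ho] at hd; simp at hd
      | some v =>
        rw [ho] at hd
        simp at hd
        simpa [ho] using hd
    have hmf := main_fold sa msg 0 0 [] hlen (by simp) hpre2
    rw [List.drop_zero, List.take_zero, List.append_nil] at hmf
    rw [← hsa]
    simpa using hmf
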